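-- pv_equiv track=rewrite | github.com/ufo2011/NXP-MCUBootUtility | src/ui/uicore.py | getFormattedFuseValue
-- ===== SOURCE A (Python) =====
-- def getFormattedFuseValue( fuseValue, direction='LSB'):
--     formattedVal32 = ''
--     for i in range(8):
--         loc = 0
--         if direction =='LSB':
--             loc = 32 - (i + 1) * 4
--         elif direction =='MSB':
--             loc = i * 4
--         else:
--             pass
--         halfbyteStr = str(hex((fuseValue & (0xF << loc))>> loc))
--         formattedVal32 += halfbyteStr[2]
--     return formattedVal32
-- ===== SOURCE B (Python) =====
-- def getFormattedFuseValue(fuseValue, direction='LSB'):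
--     msbHex = '%08x' % (fuseValue & 0xFFFFFFFF)
--     if direction == 'LSB':
--         return msbHex
--     elif direction == 'MSB':
--         return msbHex[::-1]
--     else:
--         return ('%x' % (fuseValue & 0xF)) * 8
-- ===== Notes on version B (the rewrite author's own statement) =====
-- stated objective: idiomatic
-- what changed: Replaces the 8-iteration per-nibble mask/shift/hex loop with one '%08x' formatting of the masked 32-bit value, reversed for MSB, and a single low-nibble character repeated 8 times for any other direction.
import Mathlib
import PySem

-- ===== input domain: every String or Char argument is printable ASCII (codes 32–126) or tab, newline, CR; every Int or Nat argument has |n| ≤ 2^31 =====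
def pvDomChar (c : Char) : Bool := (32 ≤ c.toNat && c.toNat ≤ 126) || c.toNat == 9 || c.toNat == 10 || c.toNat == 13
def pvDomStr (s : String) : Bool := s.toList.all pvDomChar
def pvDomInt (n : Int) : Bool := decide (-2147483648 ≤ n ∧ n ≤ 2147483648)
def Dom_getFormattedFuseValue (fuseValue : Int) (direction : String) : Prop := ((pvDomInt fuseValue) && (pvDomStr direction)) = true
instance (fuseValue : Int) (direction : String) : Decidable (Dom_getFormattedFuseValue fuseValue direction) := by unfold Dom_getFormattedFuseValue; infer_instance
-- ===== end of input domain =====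

-- B replaces A's 8-iteration mask/shift/hex nibble loop by formatting the masked 32-bit value once ('%08x'), reversing it for 'MSB' (objective: idiomatic).

-- ===== PORT A =====

-- hex digit characters, lowercase (as Python's hex()/'%x' produce)
def hexDigit (n : Nat) : Char :=
  ['0','1','2','3','4','5','6','7','8','9','a','b','c','d','e','f'].getD n '0'

-- digits of Python's hex(n) after the "0x" prefix, for n ≥ 0 (exact for every Nat)
def natHexDigits (n : Nat) : List Char :=
  if _h : n < 16 then [hexDigit n]
  else natHexDigits (n / 16) ++ [hexDigit (n % 16)]
  decreasing_by exact Nat.div_lt_self (by omega) (by omega)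

-- exact port of Python's hex() as a character list ("0x…", "-0x…" for negatives)
def pyHexChars (v : Int) : List Char :=
  if v < 0 then '-' :: '0' :: 'x' :: natHexDigits (-v).toNat
  else '0' :: 'x' :: natHexDigits v.toNat

-- A: for each of 8 nibbles pick loc by direction, mask/shift, take hex()[2]; += on the string
-- is the accumulator `++ [c]`.  `loc.toNat` is exact: loc is always ≥ 0 here (28…0, 0…28 or 0).
def getFormattedFuseValue (fuseValue : Int) (direction : String) : String :=
  String.ofList ((PySem.List.pyRange 0 8 1).foldl (fun acc i =>
    let loc : Int := if direction == "LSB" then 32 - (i + 1) * 4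
                     else if direction == "MSB" then i * 4
                     else 0
    let halfbyteStr := pyHexChars ((PySem.Int.band fuseValue ((15:Int) <<< loc.toNat)) >>> loc.toNat)
    acc ++ [PySem.List.pyGetD halfbyteStr 2 ' ']) [])

-- ===== PORT B =====

-- '%08x': 8 hex digits of m, built back-to-front from the low nibble
def hex8Aux : Nat → Nat → List Char → List Char
  | 0, _, acc => acc
  | j + 1, m, acc => hex8Aux j (m / 16) (hexDigit (m % 16) :: acc)

def getFormattedFuseValue_alt (fuseValue : Int) (direction : String) : String :=
  let msbHex := hex8Aux 8 (PySem.Int.band fuseValue 4294967295).toNat []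
  if direction == "LSB" then String.ofList msbHex
  else if direction == "MSB" then String.ofList msbHex.reverse
  else String.ofList (List.replicate 8 (hexDigit (PySem.Int.band fuseValue 15).toNat))

-- ===== PRECONDITION & SPEC =====
def Spec_getFormattedFuseValue (fuseValue : Int) (direction : String) (out : String) : Prop := out = getFormattedFuseValue_alt fuseValue direction
instance (fuseValue : Int) (direction : String) (out : String) : Decidable (Spec_getFormattedFuseValue fuseValue direction out) := by unfold Spec_getFormattedFuseValue; infer_instance

-- ===== CLAIM (what is proved, stated in full; the proofs are below) =====
def Claim_equal_getFormattedFuseValue : Prop := ∀ (fuseValue : Int) (direction : String), Dom_getFormattedFuseValue fuseValue direction → Spec_getFormattedFuseValue fuseValue direction (getFormattedFuseValue fuseValue direction)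

-- ===== LEMMAS AND PROOFS =====

-- a 15-mask shifted left selects nibble k
theorem natAnd_fifteen_shift (n k : Nat) :
    n &&& (15 <<< k) = (n / 2 ^ k % 16) * 2 ^ k := by
  have h : n &&& (15 <<< k) = ((n >>> k) &&& 15) <<< k := by
    apply Nat.eq_of_testBit_eq
    intro i
    have h15 : (15 : Nat) = 2 ^ 4 - 1 := rfl
    rw [h15]
    by_cases hik : k ≤ i
    · simp [Nat.testBit_and, Nat.testBit_shiftLeft, Nat.testBit_shiftRight,
        Nat.testBit_two_pow_sub_one, hik, Nat.sub_add_cancel hik, Bool.and_comm]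
    · simp [Nat.testBit_and, Nat.testBit_shiftLeft, hik]
  rw [h, Nat.shiftRight_eq_div_pow, Nat.shiftLeft_eq]
  have h15 : (15 : Nat) = 2 ^ 4 - 1 := rfl
  rw [h15, Nat.and_two_pow_sub_one_eq_mod]

-- A's nibble at shift k, with the sign of fuseValue made explicit
theorem nibbleA (x : Int) (k : Nat) :
    (PySem.Int.band x ((15:Int) <<< k)) >>> k =
      ((if 0 ≤ x then x.toNat / 2 ^ k % 16 else 15 - (-x - 1).toNat / 2 ^ k % 16 : Nat) : Int) := by
  have hmask : ((15:Int) <<< k) = ((15 <<< k : Nat) : Int) := by simp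
  rw [hmask]
  by_cases hx : 0 ≤ x
  · rw [PySem.Int.band_of_nonneg hx (by positivity), if_pos hx]
    rw [Int.toNat_natCast, ← Int.natCast_shiftRight, natAnd_fifteen_shift,
      Nat.shiftRight_eq_div_pow, Nat.mul_div_cancel _ ((by positivity))]
  · rw [if_neg hx]
    unfold PySem.Int.band
    rw [if_neg (by omega), if_pos (by positivity)]
    rw [Int.toNat_natCast, Nat.and_comm, ← Int.natCast_shiftRight,
      Nat.shiftRight_eq_div_pow, natAnd_fifteen_shift, Nat.shiftLeft_eq]
    have hP : 0 < 2 ^ k := (by positivity)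
    rw [← Nat.sub_mul, Nat.mul_div_cancel _ hP]


-- mask by 2^c-1 keeps the low c bits, with the sign of x made explicit
theorem bandMaskNat (x : Int) (c : Nat) :
    (PySem.Int.band x (((2 ^ c - 1 : Nat) : Int))).toNat =
      if 0 ≤ x then x.toNat % 2 ^ c else 2 ^ c - 1 - (-x - 1).toNat % 2 ^ c := by
  by_cases hx : 0 ≤ x
  · rw [PySem.Int.band_of_nonneg hx (by positivity), if_pos hx, Int.toNat_natCast,
      Int.toNat_natCast, Nat.and_two_pow_sub_one_eq_mod]
  · unfold PySem.Int.band
    rw [if_neg (by omega), if_pos (by positivity), if_neg hx, Int.toNat_natCast,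
      Int.toNat_natCast, Nat.and_comm, Nat.and_two_pow_sub_one_eq_mod]

theorem m_form (x : Int) : (PySem.Int.band x 4294967295).toNat =
    if 0 ≤ x then x.toNat % 4294967296 else 4294967295 - ((-x).toNat - 1) % 4294967296 := by
  have h := bandMaskNat x 32
  norm_num at h
  exact h

theorem low_form (x : Int) : (PySem.Int.band x 15).toNat =
    if 0 ≤ x then x.toNat % 16 else 15 - ((-x).toNat - 1) % 16 := by
  have h := bandMaskNat x 4
  norm_num at h
  exact h

-- hex(t)[2] is the hex digit of a nibble
theorem hexChar_of_nibble (t : Nat) (h : t < 16) :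
    PySem.List.pyGetD (pyHexChars ((t : Nat) : Int)) 2 ' ' = hexDigit t := by
  unfold pyHexChars
  rw [if_neg (by omega), Int.toNat_natCast, natHexDigits, dif_pos h]
  simp [PySem.List.pyGetD, PySem.List.pyGet?, PySem.List.pyIdx?]

-- A's character for the nibble at shift k
theorem charA (v : Int) (k : Nat) :
    PySem.List.pyGetD (pyHexChars ((PySem.Int.band v ((15:Int) <<< k)) >>> k)) 2 ' '
      = hexDigit (if 0 ≤ v then v.toNat / 2 ^ k % 16 else 15 - (-v - 1).toNat / 2 ^ k % 16) := by
  rw [nibbleA, hexChar_of_nibble _ (by split_ifs <;> omega)]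

-- A's character for the low nibble (loc = 0)
theorem charA0 (v : Int) :
    PySem.List.pyGetD (pyHexChars (PySem.Int.band v 15)) 2 ' '
      = hexDigit (if 0 ≤ v then v.toNat % 16 else 15 - ((-v).toNat - 1) % 16) := by
  have h := charA v 0
  norm_num at h
  exact h

-- ===== VERDICT (by name: the statement is the Claim_ definition above) =====
theorem getFormattedFuseValue_spec : Claim_equal_getFormattedFuseValue := by
  intro v direction _
  unfold Spec_getFormattedFuseValue
  by_cases hL : direction = "LSB"
  · subst hL
    have hA : getFormattedFuseValue v "LSB" = String.ofList [
        PySem.List.pyGetD (pyHexChars ((PySem.Int.band v ((15:Int) <<< (28:Nat))) >>> (28:Nat))) 2 ' ',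
        PySem.List.pyGetD (pyHexChars ((PySem.Int.band v ((15:Int) <<< (24:Nat))) >>> (24:Nat))) 2 ' ',
        PySem.List.pyGetD (pyHexChars ((PySem.Int.band v ((15:Int) <<< (20:Nat))) >>> (20:Nat))) 2 ' ',
        PySem.List.pyGetD (pyHexChars ((PySem.Int.band v ((15:Int) <<< (16:Nat))) >>> (16:Nat))) 2 ' ',
        PySem.List.pyGetD (pyHexChars ((PySem.Int.band v ((15:Int) <<< (12:Nat))) >>> (12:Nat))) 2 ' ',
        PySem.List.pyGetD (pyHexChars ((PySem.Int.band v ((15:Int) <<< (8:Nat))) >>> (8:Nat))) 2 ' ',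
        PySem.List.pyGetD (pyHexChars ((PySem.Int.band v ((15:Int) <<< (4:Nat))) >>> (4:Nat))) 2 ' ',
        PySem.List.pyGetD (pyHexChars (PySem.Int.band v 15)) 2 ' '] := by
      unfold getFormattedFuseValue
      rw [show PySem.List.pyRange 0 8 1 = [0,1,2,3,4,5,6,7] from by decide]
      simp only [List.foldl, show (("LSB":String) == "LSB") = true from by decide,
        eq_self_iff_true, if_true]
      norm_num
      simp only [show Int.toNat 28 = 28 from rfl, show Int.toNat 24 = 24 from rfl,
          show Int.toNat 20 = 20 from rfl, show Int.toNat 16 = 16 from rfl,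
          show Int.toNat 12 = 12 from rfl, show Int.toNat 8 = 8 from rfl,
          show Int.toNat 4 = 4 from rfl]
    have hB : getFormattedFuseValue_alt v "LSB" = String.ofList [
        hexDigit ((PySem.Int.band v 4294967295).toNat/16/16/16/16/16/16/16 % 16),
        hexDigit ((PySem.Int.band v 4294967295).toNat/16/16/16/16/16/16 % 16),
        hexDigit ((PySem.Int.band v 4294967295).toNat/16/16/16/16/16 % 16),
        hexDigit ((PySem.Int.band v 4294967295).toNat/16/16/16/16 % 16),
        hexDigit ((PySem.Int.band v 4294967295).toNat/16/16/16 % 16),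
        hexDigit ((PySem.Int.band v 4294967295).toNat/16/16 % 16),
        hexDigit ((PySem.Int.band v 4294967295).toNat/16 % 16),
        hexDigit ((PySem.Int.band v 4294967295).toNat % 16)] := by
      unfold getFormattedFuseValue_alt
      rw [if_pos (by decide)]
      rfl
    rw [hA, hB, m_form]
    simp only [charA0, charA]
    refine congrArg String.ofList ?_
    split_ifs with h <;>
      · norm_num
        repeat' apply And.intro
        all_goals exact congrArg hexDigit (by omega)
  · by_cases hM : direction = "MSB"
    · subst hM
      have hA : getFormattedFuseValue v "MSB" = String.ofList [
          PySem.List.pyGetD (pyHexChars (PySem.Int.band v 15)) 2 ' ',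
          PySem.List.pyGetD (pyHexChars ((PySem.Int.band v ((15:Int) <<< (4:Nat))) >>> (4:Nat))) 2 ' ',
          PySem.List.pyGetD (pyHexChars ((PySem.Int.band v ((15:Int) <<< (8:Nat))) >>> (8:Nat))) 2 ' ',
          PySem.List.pyGetD (pyHexChars ((PySem.Int.band v ((15:Int) <<< (12:Nat))) >>> (12:Nat))) 2 ' ',
          PySem.List.pyGetD (pyHexChars ((PySem.Int.band v ((15:Int) <<< (16:Nat))) >>> (16:Nat))) 2 ' ',
          PySem.List.pyGetD (pyHexChars ((PySem.Int.band v ((15:Int) <<< (20:Nat))) >>> (20:Nat))) 2 ' ',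
          PySem.List.pyGetD (pyHexChars ((PySem.Int.band v ((15:Int) <<< (24:Nat))) >>> (24:Nat))) 2 ' ',
          PySem.List.pyGetD (pyHexChars ((PySem.Int.band v ((15:Int) <<< (28:Nat))) >>> (28:Nat))) 2 ' '] := by
        unfold getFormattedFuseValue
        rw [show PySem.List.pyRange 0 8 1 = [0,1,2,3,4,5,6,7] from by decide]
        simp only [List.foldl, show (("MSB":String) == "LSB") = false from by decide,
          show (("MSB":String) == "MSB") = true from by decide,
          Bool.false_eq_true, if_false, if_true]
        norm_num
        simp only [show Int.toNat 28 = 28 from rfl, show Int.toNat 24 = 24 from rfl,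
          show Int.toNat 20 = 20 from rfl, show Int.toNat 16 = 16 from rfl,
          show Int.toNat 12 = 12 from rfl, show Int.toNat 8 = 8 from rfl,
          show Int.toNat 4 = 4 from rfl]
      have hB : getFormattedFuseValue_alt v "MSB" = String.ofList [
          hexDigit ((PySem.Int.band v 4294967295).toNat % 16),
          hexDigit ((PySem.Int.band v 4294967295).toNat/16 % 16),
          hexDigit ((PySem.Int.band v 4294967295).toNat/16/16 % 16),
          hexDigit ((PySem.Int.band v 4294967295).toNat/16/16/16 % 16),
          hexDigit ((PySem.Int.band v 4294967295).toNat/16/16/16/16 % 16),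
          hexDigit ((PySem.Int.band v 4294967295).toNat/16/16/16/16/16 % 16),
          hexDigit ((PySem.Int.band v 4294967295).toNat/16/16/16/16/16/16 % 16),
          hexDigit ((PySem.Int.band v 4294967295).toNat/16/16/16/16/16/16/16 % 16)] := by
        unfold getFormattedFuseValue_alt
        rw [if_neg (by decide), if_pos (by decide)]
        rfl
      rw [hA, hB, m_form]
      simp only [charA0, charA]
      refine congrArg String.ofList ?_
      split_ifs with h <;>
        · norm_num
          repeat' apply And.intro
          all_goals exact congrArg hexDigit (by omega)
    · have h1 : (direction == "LSB") = false := by simp [hL]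
      have h2 : (direction == "MSB") = false := by simp [hM]
      have hA : getFormattedFuseValue v direction = String.ofList (List.replicate 8
          (PySem.List.pyGetD (pyHexChars (PySem.Int.band v 15)) 2 ' ')) := by
        unfold getFormattedFuseValue
        have hr : PySem.List.pyRange 0 8 1 = [0,1,2,3,4,5,6,7] := by decide
        rw [hr]
        simp only [List.foldl, h1, h2, Bool.false_eq_true, if_false]
        norm_num [List.replicate]
      have hB : getFormattedFuseValue_alt v direction = String.ofList
          (List.replicate 8 (hexDigit (PySem.Int.band v 15).toNat)) := by
        unfold getFormattedFuseValue_alt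
        rw [if_neg (by simp [h1]), if_neg (by simp [h2])]
      rw [hA, hB, low_form]
      simp only [charA0]
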